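-- pv_equiv track=rewrite | github.com/viteihehe/IA-E-MACHINE-LEARNING | MLprojects/NLP/BoW.py | tokenizador
-- ===== SOURCE A (Python) =====
-- vocabulario = []
--
-- def tokenizador(entrada):
--     dicionario = {}
--     temp = []
--     for i in entrada:
--         palavra = i.lower().split()
--         for p in palavra:
--             if p not in vocabulario:
--                 vocabulario.append(p)
--         temp.extend(palavra)
--
--     for i in temp:
--         dicionario[i] = dicionario.get(i, 0)+1
--
--     return dicionario
-- ===== SOURCE B (Python) =====
-- vocabulario = []
--
-- def tokenizador(entrada):
--     # Single fused pass: split/lower each item once, and for each word both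
--     # extend the global vocabulary and count it immediately (no temp list,
--     # no second counting loop).
--     dicionario = {}
--     for i in entrada:
--         for p in i.lower().split():
--             if p not in vocabulario:
--                 vocabulario.append(p)
--             dicionario[p] = dicionario.get(p, 0) + 1
--     return dicionario
-- ===== Notes on version B (the rewrite author's own statement) =====
-- stated objective: simpler
-- what changed: Fuses A's two passes (build a temp token list, then rescan it to count) into one loop that counts each word as it is tokenized, eliminating the temp list entirely.
import Mathlib
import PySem

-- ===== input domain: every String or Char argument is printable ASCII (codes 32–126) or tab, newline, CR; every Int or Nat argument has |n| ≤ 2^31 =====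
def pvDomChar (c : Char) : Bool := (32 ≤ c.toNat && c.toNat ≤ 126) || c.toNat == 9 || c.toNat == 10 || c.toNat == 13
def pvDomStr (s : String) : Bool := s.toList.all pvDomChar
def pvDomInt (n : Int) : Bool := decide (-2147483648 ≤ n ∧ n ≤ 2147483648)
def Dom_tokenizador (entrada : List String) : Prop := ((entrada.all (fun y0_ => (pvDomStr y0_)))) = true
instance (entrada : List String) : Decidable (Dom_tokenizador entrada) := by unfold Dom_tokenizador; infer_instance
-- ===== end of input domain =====

-- B fuses A's two passes (build temp list, then rescan to count) into one counting loop; equivalence is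
-- about the RETURN value only (both Pythons also append new words to the module-global `vocabulario`,
-- modelled here as threaded state that the return value does not depend on).

-- ===== PORT A =====
-- first loop threads (vocabulario, temp); second loop counts temp into dicionario
def tokenizador (entrada : List String) : List (String × Int) :=
  let st := entrada.foldl
    (fun (st : List String × List String) i =>
      let palavra := PySem.Str.split₀ (PySem.Str.lower i)
      let vocab := palavra.foldl (fun v p => if p ∈ v then v else v ++ [p]) st.1
      (vocab, st.2 ++ palavra))
    (([] : List String), ([] : List String))
  let dicionario := st.2.foldl (fun d i => d.insert i (d.getD i 0 + 1))
    (PySem.Dict.empty : PySem.Dict String Int)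
  dicionario.items

-- ===== PORT B =====
-- one fused pass threading (vocabulario, dicionario)
def tokenizador_alt (entrada : List String) : List (String × Int) :=
  let st := entrada.foldl
    (fun (st : List String × PySem.Dict String Int) i =>
      (PySem.Str.split₀ (PySem.Str.lower i)).foldl
        (fun st p =>
          ((if p ∈ st.1 then st.1 else st.1 ++ [p]),
           st.2.insert p (st.2.getD p 0 + 1)))
        st)
    (([] : List String), (PySem.Dict.empty : PySem.Dict String Int))
  st.2.items

-- ===== PRECONDITION & SPEC =====
def Spec_tokenizador (entrada : List String) (out : List (String × Int)) : Prop := out = tokenizador_alt entrada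
instance (entrada : List String) (out : List (String × Int)) : Decidable (Spec_tokenizador entrada out) := by unfold Spec_tokenizador; infer_instance

-- ===== CLAIM (what is proved, stated in full; the proofs are below) =====
def Claim_equal_tokenizador : Prop := ∀ (entrada : List String), Dom_tokenizador entrada → Spec_tokenizador entrada (tokenizador entrada)

-- ===== LEMMAS AND PROOFS =====

-- A's first loop: the temp component accumulates the flattened word lists
theorem pv_temp_eq (l : List String) (st : List String × List String) :
    (l.foldl
      (fun (st : List String × List String) i =>
        let palavra := PySem.Str.split₀ (PySem.Str.lower i)
        let vocab := palavra.foldl (fun v p => if p ∈ v then v else v ++ [p]) st.1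
        (vocab, st.2 ++ palavra)) st).2
      = st.2 ++ l.flatMap (fun i => PySem.Str.split₀ (PySem.Str.lower i)) := by
  induction l generalizing st with
  | nil => simp
  | cons x xs ih => simp only [List.foldl_cons, List.flatMap_cons]; rw [ih]; simp [List.append_assoc]

-- B's inner loop: the dict component counts the words (vocab is passenger state)
theorem pv_inner_dict (ws : List String) (st : List String × PySem.Dict String Int) :
    (ws.foldl
      (fun (st : List String × PySem.Dict String Int) p =>
        ((if p ∈ st.1 then st.1 else st.1 ++ [p]),
         st.2.insert p (st.2.getD p 0 + 1))) st).2
      = ws.foldl (fun d p => d.insert p (d.getD p 0 + 1)) st.2 := by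
  induction ws generalizing st with
  | nil => rfl
  | cons w ws ih => simp [ih]

-- B's outer loop's dict component equals counting the flattened word list
theorem pv_outer_dict (l : List String) (st : List String × PySem.Dict String Int) :
    (l.foldl
      (fun (st : List String × PySem.Dict String Int) i =>
        (PySem.Str.split₀ (PySem.Str.lower i)).foldl
          (fun st p =>
            ((if p ∈ st.1 then st.1 else st.1 ++ [p]),
             st.2.insert p (st.2.getD p 0 + 1))) st) st).2
      = (l.flatMap (fun i => PySem.Str.split₀ (PySem.Str.lower i))).foldl (fun d p => d.insert p (d.getD p 0 + 1)) st.2 := by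
  induction l generalizing st with
  | nil => rfl
  | cons x xs ih =>
    simp only [List.foldl_cons, List.flatMap_cons, List.foldl_append]
    rw [ih, pv_inner_dict]

-- ===== VERDICT (by name: the statement is the Claim_ definition above) =====
theorem tokenizador_spec : Claim_equal_tokenizador := by
  intro entrada _
  show tokenizador entrada = tokenizador_alt entrada
  simp only [tokenizador, tokenizador_alt]
  rw [pv_outer_dict entrada ([], PySem.Dict.empty),
      pv_temp_eq entrada ([], [])]
  simp
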